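-- pv_equiv track=rewrite | github.com/KajaBraz/AdventOfCode2020 | day23.py | find_destination
-- ===== SOURCE A (Python) =====
-- def find_destination(nums: [int]) -> (int, int):
--     current = nums[0]
--     destination = current - 1
--     while destination not in nums[1:]:
--         if destination > min(nums[1:]):
--             destination -= 1
--         else:
--             destination = max(nums[1:])
--     for ind in range(1, len(nums)):
--         if nums[ind] == destination:
--             return ind, destination
-- ===== SOURCE B (Python) =====
-- def find_destination(nums: [int]) -> (int, int):
--     current = nums[0]
--     tail = nums[1:]
--     candidates = [v for v in tail if v <= current - 1]
--     destination = max(candidates) if candidates else max(tail)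
--     return 1 + tail.index(destination), destination
-- ===== Notes on version B (the rewrite author's own statement) =====
-- stated objective: simpler
-- what changed: Replaces A's decrement-with-wraparound while-loop and its index-scanning for-loop by a closed form: destination = max of the tail elements <= current-1 (or max(tail) if none), and the index via a single list.index call on the tail.
import Mathlib
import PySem

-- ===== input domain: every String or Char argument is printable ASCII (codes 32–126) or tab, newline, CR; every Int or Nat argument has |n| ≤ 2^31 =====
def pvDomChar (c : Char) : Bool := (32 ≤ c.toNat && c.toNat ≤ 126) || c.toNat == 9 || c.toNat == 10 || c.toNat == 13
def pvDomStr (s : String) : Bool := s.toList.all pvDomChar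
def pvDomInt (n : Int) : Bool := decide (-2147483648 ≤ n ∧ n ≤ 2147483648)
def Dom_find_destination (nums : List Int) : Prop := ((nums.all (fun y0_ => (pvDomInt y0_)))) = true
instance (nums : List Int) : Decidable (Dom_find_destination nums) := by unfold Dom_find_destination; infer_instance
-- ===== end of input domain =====

-- B replaces A's decrement-with-wraparound while-loop and index-scanning for-loop by a
-- closed-form max over the filtered tail plus a single list.index call.


-- ===== PORT A =====
-- the while-loop `while destination not in nums[1:]: if destination > min(...): destination -= 1
-- else: destination = max(...)` with mn = min(nums[1:]), mx = max(nums[1:]).  In the else branch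
-- Python sets destination = mx and re-tests the condition; since mx = max(t) ∈ t the loop then
-- exits at once, so the branch returns mx.
def destLoop (t : List Int) (mn mx d : Int) : Int :=
  if d ∈ t then d
  else if mn < d then destLoop t mn mx (d - 1)
  else mx
termination_by (d - mn).toNat
decreasing_by omega

-- the for-loop: `for ind in range(1, len(nums)): if nums[ind] == destination: return ind, destination`
def findLoop (nums : List Int) (ind : Nat) (dest : Int) : Int × Int :=
  if h : ind < nums.length then
    if nums[ind] = dest then ((ind : Int), dest) else findLoop nums (ind + 1) dest
  else (0, 0)  -- Python falls through returning None here; unreachable since destination ∈ nums[1:]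
termination_by nums.length - ind

def find_destination (nums : List Int) : Int × Int :=
  match nums with
  | [] => (0, 0)  -- nums[0] raises IndexError: excluded by Pre_
  | current :: t =>
    match PySem.List.min? t (fun x => x), PySem.List.max? t (fun x => x) with
    | some mn, some mx => findLoop (current :: t) 1 (destLoop t mn mx (current - 1))
    | _, _ => (0, 0)  -- min()/max() of the empty tail raise ValueError: excluded by Pre_

-- ===== PORT B =====
def find_destination_alt (nums : List Int) : Int × Int :=
  match nums with
  | [] => (0, 0)  -- nums[0] raises IndexError: excluded by Pre_
  | current :: tail =>
    let candidates := tail.filter (fun v => v ≤ current - 1)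
    let destination :=
      match PySem.List.max? candidates (fun x => x) with
      | some m => m
      | none => (PySem.List.max? tail (fun x => x)).getD 0  -- max of the empty tail raises: excluded by Pre_
    (1 + (((PySem.List.index? tail destination).getD 0 : Nat) : Int), destination)

-- ===== PRECONDITION & SPEC =====
-- Pre_ excludes nums of length < 2, on which A raises (IndexError on [], ValueError from min([]) otherwise).
def Pre_find_destination (nums : List Int) : Prop := 2 ≤ nums.length
instance (nums : List Int) : Decidable (Pre_find_destination nums) := by unfold Pre_find_destination; infer_instance
def pvWitness_find_destination : List Int := [3, 1, 2]

def Spec_find_destination (nums : List Int) (out : Int × Int) : Prop := out = find_destination_alt nums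
instance (nums : List Int) (out : Int × Int) : Decidable (Spec_find_destination nums out) := by unfold Spec_find_destination; infer_instance

-- ===== CLAIM (what is proved, stated in full; the proofs are below) =====
def Claim_equal_find_destination : Prop := ∀ (nums : List Int), Dom_find_destination nums → Pre_find_destination nums → Spec_find_destination nums (find_destination nums)

-- ===== LEMMAS AND PROOFS =====

-- A's while-loop computes B's closed form: the largest tail element ≤ current - 1 if one
-- exists, else max(tail).  Invariant: no tail element lies strictly between d and c - 1.
theorem destLoop_eq (t : List Int) (c mn mx : Int)
    (hmx : PySem.List.max? t (fun x => x) = some mx)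
    (hmn : PySem.List.min? t (fun x => x) = some mn) :
    ∀ n d, (d - mn).toNat = n → d ≤ c - 1 → (∀ v ∈ t, v ≤ c - 1 → v ≤ d) →
    destLoop t mn mx d =
      (match PySem.List.max? (t.filter (fun v => v ≤ c - 1)) (fun x => x) with
       | some m => m
       | none => mx) := by
  intro n
  induction n using Nat.strong_induction_on with
  | _ n ih =>
    intro d hn hd hinv
    rw [destLoop]
    by_cases hmem : d ∈ t
    · rw [if_pos hmem]
      have hdc : d ∈ t.filter (fun v => v ≤ c - 1) := by
        simp only [List.mem_filter, decide_eq_true_eq]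
        exact ⟨hmem, hd⟩
      cases hcand : PySem.List.max? (t.filter (fun v => v ≤ c - 1)) (fun x => x) with
      | none =>
        rw [PySem.List.max?_eq_none_iff] at hcand
        rw [hcand] at hdc; simp at hdc
      | some m =>
        have hm := PySem.List.max?_mem hcand
        have h1 := PySem.List.max?_isMax hcand d hdc
        simp only [List.mem_filter, decide_eq_true_eq] at hm
        have h2 := hinv m hm.1 hm.2
        show d = m
        simp only at h1
        omega
    · rw [if_neg hmem]
      by_cases hgt : mn < d
      · rw [if_pos hgt]
        rw [ih (d - 1 - mn).toNat (by omega) (d - 1) rfl (by omega)]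
        intro v hv hvc
        have h1 := hinv v hv hvc
        have h2 : v ≠ d := fun h => hmem (h ▸ hv)
        omega
      · rw [if_neg hgt]
        have hcand : t.filter (fun v => v ≤ c - 1) = [] := by
          rw [List.filter_eq_nil_iff]
          intro v hv hvc
          simp only [decide_eq_true_eq] at hvc
          have h1 := hinv v hv hvc
          have h2 := PySem.List.min?_isMin hmn v hv
          simp only at h2
          have h3 : v ≠ d := fun h => hmem (h ▸ hv)
          omega
        rw [hcand]
        have h0 : PySem.List.max? ([] : List Int) (fun x => x) = none :=
          (PySem.List.max?_eq_none_iff _ _).mpr rfl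
        rw [h0]

-- A's for-loop started at index |pre| over pre ++ t returns (|pre| + index of dest in t, dest).
theorem findLoop_eq (dest : Int) : ∀ (t pre : List Int), dest ∈ t →
    findLoop (pre ++ t) pre.length dest =
      ((pre.length : Int) + (((PySem.List.index? t dest).getD 0 : Nat) : Int), dest) := by
  intro t
  induction t with
  | nil => intro pre h; simp at h
  | cons x t' ih =>
    intro pre hmem
    rw [findLoop]
    have hlen : pre.length < (pre ++ x :: t').length := by simp
    rw [dif_pos hlen]
    have hget : (pre ++ x :: t')[pre.length]'hlen = x := by
      simp [List.getElem_append_right]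
    rw [hget]
    by_cases hx : x = dest
    · subst hx
      rw [if_pos rfl, PySem.List.index?_cons_self]
      simp
    · rw [if_neg hx]
      have hmem' : dest ∈ t' := by
        rcases List.mem_cons.mp hmem with h | h
        · exact absurd h.symm hx
        · exact h
      have hstep : pre ++ x :: t' = (pre ++ [x]) ++ t' := by simp
      have hlen1 : pre.length + 1 = (pre ++ [x]).length := by simp
      rw [hstep, hlen1, ih (pre ++ [x]) hmem']
      rw [PySem.List.index?_cons_of_ne t' hx]
      have h := (PySem.List.index?_isSome_iff t' dest).mpr hmem'
      cases hidx : PySem.List.index? t' dest with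
      | none => rw [hidx] at h; simp at h
      | some k =>
        simp only [Option.map_some, Option.getD_some]
        simp only [List.length_append, List.length_cons, List.length_nil]
        push_cast
        ring_nf

-- ===== VERDICT (by name: the statement is the Claim_ definition above) =====

theorem find_destination_spec : Claim_equal_find_destination := by
  intro nums _hdom hpre
  unfold Spec_find_destination
  unfold Pre_find_destination at hpre
  match nums with
  | [] => simp at hpre
  | current :: t =>
    have ht : t ≠ [] := by intro h; subst h; simp at hpre
    cases hmx : PySem.List.max? t (fun x => x) with
    | none => rw [PySem.List.max?_eq_none_iff] at hmx; exact absurd hmx ht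
    | some mx =>
      cases hmn : PySem.List.min? t (fun x => x) with
      | none => rw [PySem.List.min?_eq_none_iff] at hmn; exact absurd hmn ht
      | some mn =>
        unfold find_destination find_destination_alt
        simp only [hmx, hmn]
        rw [destLoop_eq t current mn mx hmx hmn ((current - 1) - mn).toNat (current - 1) rfl
              (le_refl _) (fun v _ hvc => hvc)]
        set bdest := (match PySem.List.max? (t.filter (fun v => v ≤ current - 1)) (fun x => x) with
          | some m => m
          | none => mx) with hbdest
        have hmemb : bdest ∈ t := by
          rw [hbdest]
          cases hcand : PySem.List.max? (t.filter (fun v => v ≤ current - 1)) (fun x => x) with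
          | none => exact PySem.List.max?_mem hmx
          | some m =>
            have hm := PySem.List.max?_mem hcand
            simp only [List.mem_filter] at hm
            exact hm.1
        have h1 : ([current] : List Int) ++ t = current :: t := by simp
        have h2 := findLoop_eq bdest t [current] hmemb
        rw [h1] at h2
        simp only [List.length_cons, List.length_nil] at h2
        rw [h2]
        simp [hbdest]
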